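-- pv_equiv track=rewrite | github.com/amaljoshmaadhavj/TraceGuard-AI | src/processors/chunking.py | _find_break_point
-- ===== SOURCE A (Python) =====
-- def _find_break_point(text: str, start: int, preferred_end: int) -> int:
--     """
--     Find a natural break point (newline or sentence end).
--
--     Args:
--         text: Full text
--         start: Start of current chunk
--         preferred_end: Preferred end position
--
--     Returns:
--         Actual end position (at natural break)
--     """
--     # Try to break at newline first
--     newline_pos = text.rfind('\n', start, preferred_end)
--     if newline_pos > start:
--         return newline_pos + 1
--
--     # Try to break at double space (paragraph)
--     para_pos = text.rfind('\n\n', start, preferred_end)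
--     if para_pos > start:
--         return para_pos + 2
--
--     # Try to break at sentence end
--     for punct in ['. ', '! ', '? ']:
--         punct_pos = text.rfind(punct, start, preferred_end)
--         if punct_pos > start:
--             return punct_pos + 2
--
--     # Break at word boundary if possible
--     space_pos = text.rfind(' ', start, preferred_end)
--     if space_pos > start:
--         return space_pos + 1
--
--     # Fall back to hard break
--     return min(preferred_end, len(text))
-- ===== SOURCE B (Python) =====
-- def _find_break_point(text: str, start: int, preferred_end: int) -> int:
--     """Single linear scan over the window recording the last position of each
--     break kind, then one priority chain (the dead '\n\n' branch of the original
--     is dropped)."""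
--     n = len(text)
--     # normalise the window bounds with str.rfind's slice semantics
--     lo = start
--     if lo < 0:
--         lo = lo + n
--         if lo < 0:
--             lo = 0
--     hi = preferred_end
--     if hi > n:
--         hi = n
--     elif hi < 0:
--         hi = hi + n
--         if hi < 0:
--             hi = 0
--     nl = dot = exc = que = sp = -1
--     i = lo
--     while i < hi:
--         c = text[i]
--         if c == '\n':
--             nl = i
--         elif c == ' ':
--             sp = i
--         elif i + 1 < hi and text[i + 1] == ' ':
--             if c == '.':
--                 dot = i
--             elif c == '!':
--                 exc = i
--             elif c == '?':
--                 que = i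
--         i += 1
--     if nl > start:
--         return nl + 1
--     for pos in (dot, exc, que):
--         if pos > start:
--             return pos + 2
--     if sp > start:
--         return sp + 1
--     return min(preferred_end, n)
-- ===== Notes on version B (the rewrite author's own statement) =====
-- stated objective: alternative
-- what changed: B replaces the six separate backward rfind searches (newline, the dead '\n\n' paragraph search, three sentence enders, space) by one forward linear scan over the normalised window that records the last index of each break kind, followed by the same priority chain.
import Mathlib
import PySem

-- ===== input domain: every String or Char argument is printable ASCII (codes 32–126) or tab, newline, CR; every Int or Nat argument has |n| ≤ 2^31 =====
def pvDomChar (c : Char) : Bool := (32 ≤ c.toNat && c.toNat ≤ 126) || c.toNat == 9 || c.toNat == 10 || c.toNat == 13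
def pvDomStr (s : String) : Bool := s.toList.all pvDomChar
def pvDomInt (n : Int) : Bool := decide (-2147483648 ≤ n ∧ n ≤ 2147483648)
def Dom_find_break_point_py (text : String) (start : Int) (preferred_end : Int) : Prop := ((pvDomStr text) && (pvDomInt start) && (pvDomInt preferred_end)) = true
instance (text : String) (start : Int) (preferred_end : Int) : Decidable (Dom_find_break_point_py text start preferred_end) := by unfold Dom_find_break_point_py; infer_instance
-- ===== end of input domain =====

-- B replaces A's six backward rfind searches by one forward scan over the window that
-- records the last index of each break kind, then applies the same priority chain
-- (dropping A's unreachable '\n\n' branch). Objective: alternative single-pass algorithm.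

-- ===== PORT A =====
-- the `for punct in ['. ', '! ', '? ']` loop of A
def pvPunctLoop (text : String) (start : Int) (preferred_end : Int) : List String → Option Int
  | [] => none
  | p :: ps =>
    let punct_pos := PySem.Str.rfindFrom text p start (some preferred_end)
    if punct_pos > start then some (punct_pos + 2) else pvPunctLoop text start preferred_end ps

def find_break_point_py (text : String) (start : Int) (preferred_end : Int) : Int :=
  let newline_pos := PySem.Str.rfindFrom text "\n" start (some preferred_end)
  if newline_pos > start then newline_pos + 1
  else
    let para_pos := PySem.Str.rfindFrom text "\n\n" start (some preferred_end)
    if para_pos > start then para_pos + 2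
    else
      match pvPunctLoop text start preferred_end [". ", "! ", "? "] with
      | some r => r
      | none =>
        let space_pos := PySem.Str.rfindFrom text " " start (some preferred_end)
        if space_pos > start then space_pos + 1
        else min preferred_end (PySem.Str.len text)

-- ===== PORT B =====
-- the `while i < hi` scan of Source B; fuel = hi - i. text[i] is read with a default that is
-- never used: the loop only reads indices i (and i+1) strictly below hi <= len(text).
def pvScan (s : List Char) (hi : Nat) :
    Nat → Nat → Int × Int × Int × Int × Int → Int × Int × Int × Int × Int
  | 0, _, st => st
  | fuel + 1, i, (nl, dot, exc, que, sp) =>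
    let c := s.getD i ' '
    let st' :=
      if c = '\n' then ((i : Int), dot, exc, que, sp)
      else if c = ' ' then (nl, dot, exc, que, (i : Int))
      else if i + 1 < hi ∧ s.getD (i + 1) ' ' = ' ' then
        if c = '.' then (nl, (i : Int), exc, que, sp)
        else if c = '!' then (nl, dot, (i : Int), que, sp)
        else if c = '?' then (nl, dot, exc, (i : Int), sp)
        else (nl, dot, exc, que, sp)
      else (nl, dot, exc, que, sp)
    pvScan s hi fuel (i + 1) st'

def find_break_point_py_alt (text : String) (start : Int) (preferred_end : Int) : Int :=
  let s := text.toList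
  let n : Int := s.length
  let lo : Int := if start < 0 then (if start + n < 0 then 0 else start + n) else start
  let hi : Int :=
    if preferred_end > n then n
    else if preferred_end < 0 then (if preferred_end + n < 0 then 0 else preferred_end + n)
    else preferred_end
  match pvScan s hi.toNat (hi - lo).toNat lo.toNat (-1, -1, -1, -1, -1) with
  | (nl, dot, exc, que, sp) =>
    if nl > start then nl + 1
    else if dot > start then dot + 2
    else if exc > start then exc + 2
    else if que > start then que + 2
    else if sp > start then sp + 1
    else min preferred_end n


-- ===== PRECONDITION & SPEC =====
def Spec_find_break_point_py (text : String) (start : Int) (preferred_end : Int) (out : Int) : Prop := out = find_break_point_py_alt text start preferred_end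
instance (text : String) (start : Int) (preferred_end : Int) (out : Int) : Decidable (Spec_find_break_point_py text start preferred_end out) := by unfold Spec_find_break_point_py; infer_instance

-- ===== CLAIM (what is proved, stated in full; the proofs are below) =====
def Claim_equal_find_break_point_py : Prop := ∀ (text : String) (start : Int) (preferred_end : Int), Dom_find_break_point_py text start preferred_end → Spec_find_break_point_py text start preferred_end (find_break_point_py text start preferred_end)

-- ===== LEMMAS AND PROOFS =====

def pvLast (P : Nat → Prop) (lo k : Nat) (v : Int) : Prop :=
  (v = -1 ∧ ∀ i, lo ≤ i → i < k → ¬ P i) ∨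
  (∃ i : Nat, v = (i : Int) ∧ lo ≤ i ∧ i < k ∧ P i ∧ ∀ i', i < i' → i' < k → ¬ P i')

def pvPn (s : List Char) (i : Nat) : Prop := s.getD i ' ' = '\n'
def pvPsp (s : List Char) (i : Nat) : Prop := s.getD i ' ' = ' '
def pvP2 (s : List Char) (hi : Nat) (c : Char) (i : Nat) : Prop :=
  i + 1 < hi ∧ s.getD (i + 1) ' ' = ' ' ∧ s.getD i ' ' = c

theorem pvLast_hit {P : Nat → Prop} {lo i : Nat} (hlo : lo ≤ i) (hp : P i) :
    pvLast P lo (i + 1) (i : Int) := by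
  right; exact ⟨i, rfl, hlo, Nat.lt_succ_self i, hp,
    fun i' h1 h2 => absurd (Nat.lt_of_lt_of_le h1 (Nat.lt_succ_iff.mp h2)) (lt_irrefl i)⟩

theorem pvLast_miss {P : Nat → Prop} {lo i : Nat} {v : Int} (h : pvLast P lo i v) (hp : ¬ P i) :
    pvLast P lo (i + 1) v := by
  rcases h with ⟨hv, hnone⟩ | ⟨j, hv, hlo, hlt, hpj, hmax⟩
  · left; refine ⟨hv, fun i' h1 h2 => ?_⟩
    rcases Nat.lt_succ_iff_lt_or_eq.mp h2 with h | h
    · exact hnone i' h1 h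
    · subst h; exact hp
  · right; refine ⟨j, hv, hlo, Nat.lt_succ_of_lt hlt, hpj, fun i' h1 h2 => ?_⟩
    rcases Nat.lt_succ_iff_lt_or_eq.mp h2 with h | h
    · exact hmax i' h1 h
    · subst h; exact hp

theorem pvCharNe {s : List Char} {i : Nat} {a b : Char} (ha : s.getD i ' ' = a)
    (hb : s.getD i ' ' = b) (hne : a ≠ b) : False := hne (ha.symm.trans hb)

theorem pvScan_spec (s : List Char) (hi lo : Nat) :
    ∀ fuel i nl dot exc que sp, i + fuel = hi → lo ≤ i →
    pvLast (pvPn s) lo i nl →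
    pvLast (pvP2 s hi '.') lo i dot →
    pvLast (pvP2 s hi '!') lo i exc →
    pvLast (pvP2 s hi '?') lo i que →
    pvLast (pvPsp s) lo i sp →
    pvLast (pvPn s) lo hi (pvScan s hi fuel i (nl, dot, exc, que, sp)).1 ∧
    pvLast (pvP2 s hi '.') lo hi (pvScan s hi fuel i (nl, dot, exc, que, sp)).2.1 ∧
    pvLast (pvP2 s hi '!') lo hi (pvScan s hi fuel i (nl, dot, exc, que, sp)).2.2.1 ∧
    pvLast (pvP2 s hi '?') lo hi (pvScan s hi fuel i (nl, dot, exc, que, sp)).2.2.2.1 ∧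
    pvLast (pvPsp s) lo hi (pvScan s hi fuel i (nl, dot, exc, que, sp)).2.2.2.2 := by
  intro fuel
  induction fuel with
  | zero =>
    intro i nl dot exc que sp hk hlo h1 h2 h3 h4 h5
    have : i = hi := by omega
    subst this
    exact ⟨h1, h2, h3, h4, h5⟩
  | succ fuel ih =>
    intro i nl dot exc que sp hk hlo h1 h2 h3 h4 h5
    have hik : i < hi := by omega
    simp only [pvScan]
    by_cases hc1 : s.getD i ' ' = '\n'
    · rw [if_pos hc1]
      exact ih (i + 1) _ _ _ _ _ (by omega) (by omega)
        (pvLast_hit hlo hc1)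
        (pvLast_miss h2 (fun hp => pvCharNe hc1 hp.2.2 (by decide)))
        (pvLast_miss h3 (fun hp => pvCharNe hc1 hp.2.2 (by decide)))
        (pvLast_miss h4 (fun hp => pvCharNe hc1 hp.2.2 (by decide)))
        (pvLast_miss h5 (fun hp => pvCharNe hc1 hp (by decide)))
    · rw [if_neg hc1]
      by_cases hc2 : s.getD i ' ' = ' '
      · rw [if_pos hc2]
        exact ih (i + 1) _ _ _ _ _ (by omega) (by omega)
          (pvLast_miss h1 (fun hp => pvCharNe hc2 hp (by decide)))
          (pvLast_miss h2 (fun hp => pvCharNe hc2 hp.2.2 (by decide)))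
          (pvLast_miss h3 (fun hp => pvCharNe hc2 hp.2.2 (by decide)))
          (pvLast_miss h4 (fun hp => pvCharNe hc2 hp.2.2 (by decide)))
          (pvLast_hit hlo hc2)
      · rw [if_neg hc2]
        by_cases hc3 : i + 1 < hi ∧ s.getD (i + 1) ' ' = ' '
        · rw [if_pos hc3]
          by_cases hd : s.getD i ' ' = '.'
          · rw [if_pos hd]
            exact ih (i + 1) _ _ _ _ _ (by omega) (by omega)
              (pvLast_miss h1 (fun hp => pvCharNe hd hp (by decide)))
              (pvLast_hit hlo ⟨hc3.1, hc3.2, hd⟩)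
              (pvLast_miss h3 (fun hp => pvCharNe hd hp.2.2 (by decide)))
              (pvLast_miss h4 (fun hp => pvCharNe hd hp.2.2 (by decide)))
              (pvLast_miss h5 (fun hp => pvCharNe hd hp (by decide)))
          · rw [if_neg hd]
            by_cases he : s.getD i ' ' = '!'
            · rw [if_pos he]
              exact ih (i + 1) _ _ _ _ _ (by omega) (by omega)
                (pvLast_miss h1 (fun hp => pvCharNe he hp (by decide)))
                (pvLast_miss h2 (fun hp => pvCharNe he hp.2.2 (by decide)))
                (pvLast_hit hlo ⟨hc3.1, hc3.2, he⟩)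
                (pvLast_miss h4 (fun hp => pvCharNe he hp.2.2 (by decide)))
                (pvLast_miss h5 (fun hp => pvCharNe he hp (by decide)))
            · rw [if_neg he]
              by_cases hq : s.getD i ' ' = '?'
              · rw [if_pos hq]
                exact ih (i + 1) _ _ _ _ _ (by omega) (by omega)
                  (pvLast_miss h1 (fun hp => pvCharNe hq hp (by decide)))
                  (pvLast_miss h2 (fun hp => pvCharNe hq hp.2.2 (by decide)))
                  (pvLast_miss h3 (fun hp => pvCharNe hq hp.2.2 (by decide)))
                  (pvLast_hit hlo ⟨hc3.1, hc3.2, hq⟩)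
                  (pvLast_miss h5 (fun hp => pvCharNe hq hp (by decide)))
              · rw [if_neg hq]
                exact ih (i + 1) _ _ _ _ _ (by omega) (by omega)
                  (pvLast_miss h1 hc1)
                  (pvLast_miss h2 (fun hp => hd hp.2.2))
                  (pvLast_miss h3 (fun hp => he hp.2.2))
                  (pvLast_miss h4 (fun hp => hq hp.2.2))
                  (pvLast_miss h5 hc2)
        · rw [if_neg hc3]
          exact ih (i + 1) _ _ _ _ _ (by omega) (by omega)
            (pvLast_miss h1 hc1)
            (pvLast_miss h2 (fun hp => hc3 ⟨hp.1, hp.2.1⟩))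
            (pvLast_miss h3 (fun hp => hc3 ⟨hp.1, hp.2.1⟩))
            (pvLast_miss h4 (fun hp => hc3 ⟨hp.1, hp.2.1⟩))
            (pvLast_miss h5 hc2)

theorem pv_go_spec (s sub : List Char) (k : Nat) :
    (PySem.Chars.rfind.go s sub k = -1 ∧ ∀ j, j ≤ k → ¬ sub.isPrefixOf (s.drop j) = true) ∨
    (∃ j : Nat, j ≤ k ∧ PySem.Chars.rfind.go s sub k = (j : Int) ∧ sub.isPrefixOf (s.drop j) = true ∧
      ∀ j', j < j' → j' ≤ k → ¬ sub.isPrefixOf (s.drop j') = true) := by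
  induction k with
  | zero =>
    by_cases h : sub.isPrefixOf (s.drop 0) = true
    · right
      exact ⟨0, le_refl 0, by simp [PySem.Chars.rfind.go]; simpa using h, h,
        fun j' h1 h2 => absurd (Nat.lt_of_lt_of_le h1 h2) (lt_irrefl 0)⟩
    · left
      constructor
      · simp only [PySem.Chars.rfind.go]
        rw [if_neg]; simpa using h
      · intro j hj; interval_cases j; exact h
  | succ k ih =>
    by_cases h : sub.isPrefixOf (s.drop (k + 1)) = true
    · right
      refine ⟨k + 1, le_refl _, ?_, h, fun j' h1 h2 => absurd (Nat.lt_of_lt_of_le h1 h2) (lt_irrefl _)⟩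
      simp only [PySem.Chars.rfind.go]
      rw [if_pos h]
    · have hgo : PySem.Chars.rfind.go s sub (k + 1) = PySem.Chars.rfind.go s sub k := by
        simp only [PySem.Chars.rfind.go]
        rw [if_neg h]
      rcases ih with ⟨h1, h2⟩ | ⟨j, hj, hgo', hpre, hmax⟩
      · left
        refine ⟨hgo.trans h1, fun j hj => ?_⟩
        by_cases hjk : j ≤ k
        · exact h2 j hjk
        · have heq : j = k + 1 := by omega
          subst heq; exact h
      · right
        refine ⟨j, Nat.le_succ_of_le hj, hgo.trans hgo', hpre, fun j' hl hr => ?_⟩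
        by_cases hjk : j' ≤ k
        · exact hmax j' hl hjk
        · have heq : j' = k + 1 := by omega
          subst heq; exact h

theorem pv_bridge (P : Nat → Prop) (w sub : List Char) (lo hi : Nat) (hwlen : w.length = hi - lo)
    (hcorr : ∀ i : Nat, lo ≤ i → (sub.isPrefixOf (w.drop (i - lo)) = true ↔ (i < hi ∧ P i)))
    (v : Int) (hv : pvLast P lo hi v) :
    v = if PySem.Chars.rfind w sub = -1 then -1 else (lo : Int) + PySem.Chars.rfind w sub := by
  have hrf : PySem.Chars.rfind w sub = PySem.Chars.rfind.go w sub w.length := rfl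
  rcases pv_go_spec w sub w.length with ⟨hg, hnone⟩ | ⟨j, hjk, hg, hpre, hmax⟩
  · -- no prefix anywhere: v must be -1
    rw [hrf, hg, if_pos rfl]
    rcases hv with ⟨hv1, _⟩ | ⟨i, hvi, hloi, hihi, hPi, _⟩
    · exact hv1
    · exfalso
      exact hnone (i - lo) (by omega) ((hcorr i hloi).mpr ⟨hihi, hPi⟩)
  · have hij : lo + j < hi ∧ P (lo + j) := by
      have := (hcorr (lo + j) (Nat.le_add_right _ _)).mp
      simp only [Nat.add_sub_cancel_left] at this
      exact this hpre
    rcases hv with ⟨_, hnoneP⟩ | ⟨i, hvi, hloi, hihi, hPi, hmaxP⟩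
    · exact absurd hij.2 (hnoneP (lo + j) (Nat.le_add_right _ _) hij.1)
    · have h1 : lo + j ≤ i := by
        by_contra hcon
        exact hmaxP (lo + j) (by omega) hij.1 hij.2
      have h2 : i ≤ lo + j := by
        have hpre' : sub.isPrefixOf (w.drop (i - lo)) = true := (hcorr i hloi).mpr ⟨hihi, hPi⟩
        by_contra hcon
        exact hmax (i - lo) (by omega) (by omega) hpre'
      have : i = lo + j := le_antisymm h2 h1
      subst this
      rw [hrf, hg, if_neg (by omega)]
      rw [hvi]
      push_cast
      ring

theorem pv_pre1 (c : Char) (t : List Char) : [c].isPrefixOf t = true ↔ t[0]? = some c := by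
  rw [List.isPrefixOf_iff_prefix]
  cases t <;> simp [List.cons_prefix_cons, eq_comm]

theorem pv_pre2 (c d : Char) (t : List Char) :
    [c, d].isPrefixOf t = true ↔ (t[0]? = some c ∧ t[1]? = some d) := by
  rw [List.isPrefixOf_iff_prefix]
  match t with
  | [] => simp
  | [a] => simp [List.cons_prefix_cons]
  | a :: b :: t => simp [List.cons_prefix_cons, eq_comm]

-- correspondences between prefix positions in the window and the scan predicates
theorem pv_corr1 (s : List Char) (lo hi : Nat) (hhi : hi ≤ s.length) (c : Char) :
    ∀ i : Nat, lo ≤ i →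
      ([c].isPrefixOf ((List.take hi s |>.drop lo).drop (i - lo)) = true ↔
        (i < hi ∧ s.getD i ' ' = c)) := by
  intro i hlo
  rw [List.drop_drop, Nat.add_sub_cancel' hlo, pv_pre1]
  rw [show ((List.take hi s).drop i)[0]? = (List.take hi s)[i]? from by
    rw [List.getElem?_drop]; ring_nf]
  rw [List.getElem?_take]
  constructor
  · intro h
    by_cases hih : i < hi
    · rw [if_pos hih] at h
      refine ⟨hih, ?_⟩
      have hilen : i < s.length := lt_of_lt_of_le hih hhi
      rw [List.getD_eq_getElem?_getD, h]
      rfl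
    · rw [if_neg hih] at h; simp at h
  · rintro ⟨hih, hg⟩
    rw [if_pos hih]
    have hilen : i < s.length := lt_of_lt_of_le hih hhi
    rw [List.getElem?_eq_getElem hilen]
    rw [List.getD_eq_getElem?_getD, List.getElem?_eq_getElem hilen] at hg
    simpa using hg

theorem pv_corr2 (s : List Char) (lo hi : Nat) (hhi : hi ≤ s.length) (c : Char) :
    ∀ i : Nat, lo ≤ i →
      ([c, ' '].isPrefixOf ((List.take hi s |>.drop lo).drop (i - lo)) = true ↔
        (i < hi ∧ pvP2 s hi c i)) := by
  intro i hlo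
  rw [List.drop_drop, Nat.add_sub_cancel' hlo, pv_pre2]
  rw [show ((List.take hi s).drop i)[0]? = (List.take hi s)[i]? from by rw [List.getElem?_drop]; ring_nf]
  rw [show ((List.take hi s).drop i)[1]? = (List.take hi s)[i + 1]? from by rw [List.getElem?_drop]]
  rw [List.getElem?_take, List.getElem?_take]
  unfold pvP2
  constructor
  · rintro ⟨h1, h2⟩
    by_cases hih : i < hi
    · rw [if_pos hih] at h1
      by_cases hih2 : i + 1 < hi
      · rw [if_pos hih2] at h2
        have hilen : i < s.length := lt_of_lt_of_le hih hhi
        have hilen2 : i + 1 < s.length := lt_of_lt_of_le hih2 hhi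
        refine ⟨hih, hih2, ?_, ?_⟩
        · rw [List.getD_eq_getElem?_getD, h2]; rfl
        · rw [List.getD_eq_getElem?_getD, h1]; rfl
      · rw [if_neg hih2] at h2; simp at h2
    · rw [if_neg hih] at h1; simp at h1
  · rintro ⟨hih, hih2, hsp, hc⟩
    have hilen : i < s.length := lt_of_lt_of_le hih hhi
    have hilen2 : i + 1 < s.length := lt_of_lt_of_le hih2 hhi
    rw [if_pos hih, if_pos hih2]
    rw [List.getD_eq_getElem?_getD, List.getElem?_eq_getElem hilen] at hc
    rw [List.getD_eq_getElem?_getD, List.getElem?_eq_getElem hilen2] at hsp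
    rw [List.getElem?_eq_getElem hilen, List.getElem?_eq_getElem hilen2]
    simp_all

theorem pv_main (text : String) (start preferred_end : Int) :
    find_break_point_py text start preferred_end = find_break_point_py_alt text start preferred_end := by
  set s := text.toList with hs
  set n : Int := (s.length : Int) with hn
  have hn0 : 0 ≤ n := Int.natCast_nonneg _
  set st : Int := if start < 0 then (if start + n < 0 then 0 else start + n) else start with hst
  set e : Int :=
    if n < preferred_end then n
    else if preferred_end < 0 then (if preferred_end + n < 0 then 0 else preferred_end + n)
    else preferred_end with he
  have hst0 : 0 ≤ st := by rw [hst]; split_ifs <;> omega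
  have he0 : 0 ≤ e ∧ e ≤ n := by rw [he]; split_ifs <;> omega
  have hrw : ∀ sub : String, PySem.Str.rfindFrom text sub start (some preferred_end) =
      (if e < st then -1
       else if PySem.Chars.rfind (List.drop st.toNat (List.take e.toNat s)) sub.toList = -1 then -1
       else st + PySem.Chars.rfind (List.drop st.toNat (List.take e.toNat s)) sub.toList) := by
    intro sub
    rw [PySem.Str.rfindFrom_eq]
    simp only [PySem.Chars.rfindFrom, ← hs, ← hn, ← hst, ← he]
  by_cases hcase : e < st
  · -- empty window: every rfind is -1 and the scan runs zero steps
    have hA : ∀ sub : String, PySem.Str.rfindFrom text sub start (some preferred_end) = -1 :=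
      fun sub => by rw [hrw, if_pos hcase]
    have hfuel : (e - st).toNat = 0 := by omega
    have hBeq : find_break_point_py_alt text start preferred_end =
        (if (-1 : Int) > start then (-1 : Int) + 1
         else if (-1 : Int) > start then (-1 : Int) + 2
         else if (-1 : Int) > start then (-1 : Int) + 2
         else if (-1 : Int) > start then (-1 : Int) + 2
         else if (-1 : Int) > start then (-1 : Int) + 1
         else min preferred_end n) := by
      unfold find_break_point_py_alt
      simp only [gt_iff_lt, ← hs, ← hn, ← hst, ← he, hfuel]
      rfl
    rw [hBeq]
    unfold find_break_point_py
    simp only [pvPunctLoop, hA]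
    by_cases hgt : (-1 : Int) > start
    · simp only [gt_iff_lt] at hgt ⊢
      rw [if_pos hgt, if_pos hgt]
    · simp only [gt_iff_lt] at hgt ⊢
      simp only [if_neg hgt]
      rw [PySem.Str.len_eq, ← hs, ← hn]
  · -- real window [st, e)
    set lo' := st.toNat with hlo'
    set hi' := e.toNat with hhi'
    have hlh : lo' ≤ hi' := by omega
    have hhi : hi' ≤ s.length := by omega
    have hfuel : (e - st).toNat = hi' - lo' := by omega
    have hstlo : (lo' : Int) = st := Int.toNat_of_nonneg hst0
    rcases hsc : pvScan s hi' (hi' - lo') lo' (-1, -1, -1, -1, -1) with ⟨nl, dot, exc, que, sp⟩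
    have hinit : ∀ P : Nat → Prop, pvLast P lo' lo' (-1) :=
      fun P => Or.inl ⟨rfl, fun i h1 h2 _ => absurd (h1.trans_lt h2) (lt_irrefl lo')⟩
    obtain ⟨H1, H2, H3, H4, H5⟩ := pvScan_spec s hi' lo' (hi' - lo') lo' (-1) (-1) (-1) (-1) (-1)
      (by omega) (le_refl _) (hinit _) (hinit _) (hinit _) (hinit _) (hinit _)
    rw [hsc] at H1 H2 H3 H4 H5
    dsimp only at H1 H2 H3 H4 H5
    set w := List.drop lo' (List.take hi' s) with hw
    have hwlen : w.length = hi' - lo' := by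
      rw [hw, List.length_drop, List.length_take]; omega
    have hrfgo : ∀ sub : List Char,
        PySem.Chars.rfind w sub = PySem.Chars.rfind.go w sub w.length := fun _ => rfl
    have hval : ∀ (sub : List Char) (P : Nat → Prop) (v : Int), pvLast P lo' hi' v →
        (∀ i : Nat, lo' ≤ i → (sub.isPrefixOf (w.drop (i - lo')) = true ↔ (i < hi' ∧ P i))) →
        (if PySem.Chars.rfind w sub = -1 then -1 else st + PySem.Chars.rfind w sub) = v := by
      intro sub P v hv hcorr
      have := pv_bridge P w sub lo' hi' hwlen hcorr v hv
      rw [this, hstlo]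
    have E1 : PySem.Str.rfindFrom text "\n" start (some preferred_end) = nl := by
      rw [hrw, if_neg hcase, show ("\n" : String).toList = ['\n'] from by decide]
      exact hval ['\n'] (pvPn s) nl H1 (fun i hi => pv_corr1 s lo' hi' hhi '\n' i hi)
    have E2 : PySem.Str.rfindFrom text ". " start (some preferred_end) = dot := by
      rw [hrw, if_neg hcase, show (". " : String).toList = ['.', ' '] from by decide]
      exact hval ['.', ' '] (pvP2 s hi' '.') dot H2 (pv_corr2 s lo' hi' hhi '.')
    have E3 : PySem.Str.rfindFrom text "! " start (some preferred_end) = exc := by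
      rw [hrw, if_neg hcase, show ("! " : String).toList = ['!', ' '] from by decide]
      exact hval ['!', ' '] (pvP2 s hi' '!') exc H3 (pv_corr2 s lo' hi' hhi '!')
    have E4 : PySem.Str.rfindFrom text "? " start (some preferred_end) = que := by
      rw [hrw, if_neg hcase, show ("? " : String).toList = ['?', ' '] from by decide]
      exact hval ['?', ' '] (pvP2 s hi' '?') que H4 (pv_corr2 s lo' hi' hhi '?')
    have E5 : PySem.Str.rfindFrom text " " start (some preferred_end) = sp := by
      rw [hrw, if_neg hcase, show (" " : String).toList = [' '] from by decide]
      exact hval [' '] (pvPsp s) sp H5 (fun i hi => pv_corr1 s lo' hi' hhi ' ' i hi)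
    have hnlm : (-1 : Int) ≤ nl := by
      rcases H1 with ⟨h, _⟩ | ⟨i, h, _⟩
      · omega
      · rw [h]; omega
    have Epara : PySem.Str.rfindFrom text "\n\n" start (some preferred_end) ≤ nl := by
      rw [hrw, if_neg hcase, show ("\n\n" : String).toList = ['\n', '\n'] from by decide]
      rcases pv_go_spec w ['\n', '\n'] w.length with ⟨hg, _⟩ | ⟨j, hjk, hg, hpre, _⟩
      · rw [hrfgo, hg, if_pos rfl]; exact hnlm
      · rw [hrfgo, hg, if_neg (by omega)]
        obtain ⟨_, h2⟩ := (pv_pre2 '\n' '\n' (w.drop j)).mp hpre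
        rw [List.getElem?_drop] at h2
        have hjlt : j + 1 < w.length := (List.getElem?_eq_some_iff.mp h2).1
        have hpre1 : ['\n'].isPrefixOf (w.drop (j + 1)) = true := by
          rw [pv_pre1, List.getElem?_drop, Nat.add_zero]; exact h2
        rcases pv_go_spec w ['\n'] w.length with ⟨_, hnone⟩ | ⟨j2, hj2k, hg2, _, hmax2⟩
        · exact absurd hpre1 (hnone (j + 1) (by omega))
        · have hb := hval ['\n'] (pvPn s) nl H1 (fun i hi => pv_corr1 s lo' hi' hhi '\n' i hi)
          rw [hrfgo, hg2, if_neg (by omega)] at hb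
          have hj12 : j + 1 ≤ j2 := by
            by_contra hcon
            exact hmax2 (j + 1) (by omega) (by omega) hpre1
          rw [← hb]; omega
    have hBeq : find_break_point_py_alt text start preferred_end =
        (if nl > start then nl + 1
         else if dot > start then dot + 2
         else if exc > start then exc + 2
         else if que > start then que + 2
         else if sp > start then sp + 1
         else min preferred_end n) := by
      unfold find_break_point_py_alt
      simp only [gt_iff_lt, ← hs, ← hn, ← hst, ← he, hfuel, ← hlo', ← hhi']
      rw [hsc]
    rw [hBeq]
    unfold find_break_point_py
    simp only [pvPunctLoop, E1, E2, E3, E4, E5]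
    by_cases hnl : nl > start
    · simp only [gt_iff_lt] at hnl ⊢
      rw [if_pos hnl, if_pos hnl]
    · have hpara : ¬ (PySem.Str.rfindFrom text "\n\n" start (some preferred_end) > start) :=
        fun h => hnl (lt_of_lt_of_le h Epara)
      simp only [gt_iff_lt] at hnl hpara ⊢
      rw [if_neg hnl, if_neg hnl, if_neg hpara]
      by_cases hdot : start < dot
      · simp only [if_pos hdot]
      · simp only [if_neg hdot]
        by_cases hexc : start < exc
        · simp only [if_pos hexc]
        · simp only [if_neg hexc]
          by_cases hque : start < que
          · simp only [if_pos hque]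
          · simp only [if_neg hque]
            by_cases hsp : start < sp
            · simp only [if_pos hsp]
            · simp only [if_neg hsp]
              rw [PySem.Str.len_eq, ← hs, ← hn]

-- ===== VERDICT (by name: the statement is the Claim_ definition above) =====
theorem find_break_point_py_spec : Claim_equal_find_break_point_py := by
  intro text start preferred_end _
  unfold Spec_find_break_point_py
  exact pv_main text start preferred_end
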